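-- pv_equiv track=rewrite | github.com/brian-vdb/speech-recognition | analyze_build.py | get_selected_elements
-- ===== SOURCE A (Python) =====
-- def get_selected_elements(recognized: list[str]) -> dict[str, int]:
--     selected_elements = {}
--
--     # Loop thtrough each of the recognized words
--     for word in recognized:
--         if word == None:
--             continue
--
--         # Manage selected elements counter
--         if word in selected_elements:
--             selected_elements[word] += 1
--         else:
--             selected_elements[word] = 1
--
--     return selected_elements
-- ===== SOURCE B (Python) =====
-- def get_selected_elements(recognized: list[str]) -> dict[str, int]:
--     # Sort-then-group-runs: sort the words, scan each run of equal words once to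
--     # get its length, then emit the counts in first-occurrence order.
--     words = [w for w in recognized if w is not None]
--     swords = sorted(words)
--     counts = {}
--     i = 0
--     n = len(swords)
--     while i < n:
--         j = i + 1
--         while j < n and swords[j] == swords[i]:
--             j += 1
--         counts[swords[i]] = j - i
--         i = j
--     return {w: counts[w] for w in dict.fromkeys(words)}
-- ===== Notes on version B (the rewrite author's own statement) =====
-- stated objective: alternative
-- what changed: Replaces the incremental hash-counter loop by a sort-then-group-runs scan: sort the words, measure each run of equal words, then emit the counts in first-occurrence order via dict.fromkeys.
import Mathlib
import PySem

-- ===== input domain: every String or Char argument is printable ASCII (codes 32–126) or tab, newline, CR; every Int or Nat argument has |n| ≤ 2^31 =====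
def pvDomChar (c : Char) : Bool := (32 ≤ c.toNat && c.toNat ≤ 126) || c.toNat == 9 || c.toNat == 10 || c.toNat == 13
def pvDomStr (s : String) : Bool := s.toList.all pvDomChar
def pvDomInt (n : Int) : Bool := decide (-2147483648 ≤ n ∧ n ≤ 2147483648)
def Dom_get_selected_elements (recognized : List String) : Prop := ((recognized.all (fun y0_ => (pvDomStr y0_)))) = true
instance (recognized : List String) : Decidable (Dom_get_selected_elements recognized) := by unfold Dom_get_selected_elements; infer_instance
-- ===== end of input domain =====

-- B replaces A's incremental counter-dict loop by sort-then-group-runs counting (alternative decomposition, same result).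

-- ===== PORT A =====
-- A: one pass building a dict, incrementing the count of each word; `if word == None: continue`
-- can never fire for a String (None is not a String under the type convention), so the loop
-- body is the membership-tested increment-or-insert. Returns the dict as its item list.
def get_selected_elements (recognized : List String) : List (String × Int) :=
  (recognized.foldl
    (fun d word =>
      if d.contains word then d.insert word (d.getD word 0 + 1)
      else d.insert word 1)
    (PySem.Dict.empty : PySem.Dict String Int)).items

-- ===== PORT B =====
-- B's while loop over the sorted list: each step measures the run of words equal to the head
-- (the inner `while swords[j] == swords[i]` = takeWhile), records its length, and resumes
-- after the run (dropWhile).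
def pvRunScan (s : List String) (counts : PySem.Dict String Int) : PySem.Dict String Int :=
  match s with
  | [] => counts
  | x :: xs =>
      pvRunScan (xs.dropWhile (fun y => y == x))
        (counts.insert x ((xs.takeWhile (fun y => y == x)).length + 1))
termination_by s.length
decreasing_by
  simp only [List.length_cons]
  exact Nat.lt_succ_of_le ((List.dropWhile_sublist _).length_le)

-- B: `words = [w for w in recognized if w is not None]` — the filter is identically true on
-- List String (no None inhabits String), so words = recognized; sort, scan the runs, then
-- emit in first-occurrence order (dict.fromkeys = PySem.List.dedup). `counts[w]` cannot
-- raise since every deduped word occurs in the sorted list, so it is getD with unused default.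
def get_selected_elements_alt (recognized : List String) : List (String × Int) :=
  let words := recognized
  let swords := PySem.List.sorted words (fun w => w) false
  let counts := pvRunScan swords PySem.Dict.empty
  (PySem.List.dedup words).map (fun w => (w, counts.getD w 0))

-- ===== PRECONDITION & SPEC =====
def Spec_get_selected_elements (recognized : List String) (out : List (String × Int)) : Prop := out = get_selected_elements_alt recognized
instance (recognized : List String) (out : List (String × Int)) : Decidable (Spec_get_selected_elements recognized out) := by unfold Spec_get_selected_elements; infer_instance

-- ===== CLAIM (what is proved, stated in full; the proofs are below) =====
def Claim_equal_get_selected_elements : Prop := ∀ (recognized : List String), Dom_get_selected_elements recognized → Spec_get_selected_elements recognized (get_selected_elements recognized)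

-- ===== LEMMAS AND PROOFS =====

-- A's branch on `contains` computes the same step as the unbranched counter insert:
-- when the key is absent its current count defaults to 0, so inserting 1 IS inserting getD+1.
theorem step_eq_counter_step :
    (fun (d : PySem.Dict String Int) (word : String) =>
      if d.contains word then d.insert word (d.getD word 0 + 1)
      else d.insert word 1)
    = (fun d word => d.insert word (d.getD word 0 + 1)) := by
  funext d word
  by_cases h : d.contains word = true
  · simp [h]
  · have hg : d.getD word 0 = 0 :=
      PySem.Dict.getD_of_not_contains d 0 (by simpa using h)
    simp [h, hg]

-- In a sorted list whose elements are all ≥ x, the words equal to x form exactly the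
-- leading run: the run has length = the count of x, and x does not occur after it.
theorem run_count_drop (x : String) :
    ∀ xs : List String, (∀ y ∈ xs, x ≤ y) → xs.Pairwise (· ≤ ·) →
      (xs.takeWhile (fun y => y == x)).length = xs.count x ∧
      x ∉ xs.dropWhile (fun y => y == x) := by
  intro xs
  induction xs with
  | nil => intro _ _; simp
  | cons y ys ih =>
    intro hle hpw
    by_cases hyx : y = x
    · subst hyx
      have hall : ∀ z ∈ ys, y ≤ z := (List.pairwise_cons.mp hpw).1
      have := ih hall (List.pairwise_cons.mp hpw).2
      constructor
      · simp [this.1]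
      · simpa [List.dropWhile_cons] using this.2
    · have hxy : x < y := lt_of_le_of_ne (hle y (by simp)) (Ne.symm hyx)
      have hnot : x ∉ y :: ys := by
        intro hmem
        rcases List.mem_cons.mp hmem with h | h
        · exact hyx h.symm
        · exact absurd (lt_of_lt_of_le hxy ((List.pairwise_cons.mp hpw).1 x h)) (lt_irrefl x)
      have hbx : (y == x) = false := by simp [hyx]
      constructor
      · simp [hbx, List.count_eq_zero.mpr hnot]
      · simpa [List.dropWhile_cons, hbx] using hnot
  
-- The run scan over a sorted list computes each present word's count; absent words keep
-- the accumulator's value.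
theorem pvRunScan_getD :
    ∀ (s : List String) (d : PySem.Dict String Int), s.Pairwise (· ≤ ·) →
      ∀ (w : String),
        (pvRunScan s d).getD w 0 = if w ∈ s then (s.count w : Int) else d.getD w 0 := by
  intro s d
  induction s, d using pvRunScan.induct with
  | case1 counts => intro _ w; simp [pvRunScan]
  | case2 counts x xs ih =>
    intro hpw w
    have hall : ∀ z ∈ xs, x ≤ z := (List.pairwise_cons.mp hpw).1
    have hpw' : xs.Pairwise (· ≤ ·) := (List.pairwise_cons.mp hpw).2
    have hrun := run_count_drop x xs hall hpw'
    have hpwd : (xs.dropWhile (fun y => y == x)).Pairwise (· ≤ ·) :=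
      hpw'.sublist (List.dropWhile_sublist _)
    rw [pvRunScan, ih hpwd]
    by_cases hwx : w = x
    · subst hwx
      simp [hrun.2, PySem.Dict.getD_insert_self, hrun.1]
    · have hmem : w ∈ xs.dropWhile (fun y => y == x) ↔ w ∈ x :: xs := by
        constructor
        · intro h
          exact List.mem_cons_of_mem _ ((List.dropWhile_sublist _).mem h)
        · intro h
          rcases List.mem_cons.mp h with h | h
          · exact absurd h hwx
          · -- w ∈ xs and w ≠ x: w is not in the leading run, so it survives dropWhile
            have : w ∈ xs.takeWhile (fun y => y == x) ∨ w ∈ xs.dropWhile (fun y => y == x) := by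
              have := List.takeWhile_append_dropWhile (p := fun y => y == x) (l := xs)
              rw [← this] at h
              simpa using List.mem_append.mp h
            rcases this with h' | h'
            · exact absurd (by simpa using List.mem_takeWhile_imp h') hwx
            · exact h'
      by_cases hw : w ∈ x :: xs
      · have hwxs : w ∈ xs := by
          cases List.mem_cons.mp hw with
          | inl h => exact absurd h hwx
          | inr h => exact h
        have hcnt : (xs.dropWhile (fun y => y == x)).count w = xs.count w := by
          have := List.takeWhile_append_dropWhile (p := fun y => y == x) (l := xs)
          conv_rhs => rw [← this]
          rw [List.count_append]
          have : (xs.takeWhile (fun y => y == x)).count w = 0 := by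
            rw [List.count_eq_zero]
            intro h'
            exact hwx (by simpa using List.mem_takeWhile_imp h')
          omega
        simp [hmem.mpr hw, hw, hcnt, List.count_cons]
        exact fun h => hwx h.symm
      · have : w ∉ xs.dropWhile (fun y => y == x) := fun h => hw (hmem.mp h)
        simp [this, hw, PySem.Dict.getD_insert_of_ne _ _ _ hwx]

-- ===== VERDICT (by name: the statement is the Claim_ definition above) =====
theorem get_selected_elements_spec : Claim_equal_get_selected_elements := by
  intro recognized _
  unfold Spec_get_selected_elements get_selected_elements get_selected_elements_alt
  rw [step_eq_counter_step, PySem.Dict.foldl_insert_getD_add_one_eq_counter,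
      PySem.Dict.items_counter]
  simp only []
  apply List.map_congr_left
  intro w hw
  have hwmem : w ∈ recognized := by
    have := PySem.List.mem_dedup (xs := recognized) (x := w)
    simp only [PySem.List.dedup_eq_ofList] at this ⊢
    exact this.mp hw
  have hperm : (PySem.List.sorted recognized (fun w => w) false).Perm recognized :=
    PySem.List.sorted_perm recognized (fun w => w) false
  have hpw : (PySem.List.sorted recognized (fun w => w) false).Pairwise (· ≤ ·) := by
    simpa using PySem.List.sorted_pairwise recognized (fun w => w)
  rw [pvRunScan_getD _ _ hpw]
  have hmem : w ∈ PySem.List.sorted recognized (fun w => w) false :=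
    (PySem.List.mem_sorted _ _ _ _).mpr hwmem
  simp [hmem, hperm.count_eq]
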